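-- pv_equiv track=rewrite | github.com/ragatol/volk | generate.py | is_descendant_type
-- ===== SOURCE A (Python) =====
-- def is_descendant_type(types, name, base):
-- 	if name == base:
-- 		return True
-- 	type = types.get(name)
-- 	if type is None:
-- 		return False
-- 	parents = type.get('parent')
-- 	if not parents:
-- 		return False
-- 	return any([is_descendant_type(types, parent, base) for parent in parents.split(',')])
-- ===== SOURCE B (Python) =====
-- def _parents_of(types, n):
--     t = types.get(n)
--     if t is None:
--         return []
--     p = t.get('parent')
--     if not p:
--         return []
--     return p.split(',')
--
-- def is_descendant_type(types, name, base):
--     # iterative ancestor closure: grow the set of names reachable from `name`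
--     # until it stops changing (len(types)+1 rounds always suffice: an ancestor
--     # chain passes through distinct keys of `types`, plus at most one terminal)
--     reach = {name}
--     for _ in range(len(types) + 1):
--         before = len(reach)
--         for n in list(reach):
--             reach.update(_parents_of(types, n))
--         if len(reach) == before:
--             break
--     return base in reach
-- ===== Notes on version B (the rewrite author's own statement) =====
-- stated objective: alternative
-- what changed: A's recursive enumeration of every ancestor path (revisiting shared ancestors once per path) is replaced by an iterative reachable-set closure: grow the set of names reachable from `name` until it stops changing, then test membership of `base`.
import Mathlib
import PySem

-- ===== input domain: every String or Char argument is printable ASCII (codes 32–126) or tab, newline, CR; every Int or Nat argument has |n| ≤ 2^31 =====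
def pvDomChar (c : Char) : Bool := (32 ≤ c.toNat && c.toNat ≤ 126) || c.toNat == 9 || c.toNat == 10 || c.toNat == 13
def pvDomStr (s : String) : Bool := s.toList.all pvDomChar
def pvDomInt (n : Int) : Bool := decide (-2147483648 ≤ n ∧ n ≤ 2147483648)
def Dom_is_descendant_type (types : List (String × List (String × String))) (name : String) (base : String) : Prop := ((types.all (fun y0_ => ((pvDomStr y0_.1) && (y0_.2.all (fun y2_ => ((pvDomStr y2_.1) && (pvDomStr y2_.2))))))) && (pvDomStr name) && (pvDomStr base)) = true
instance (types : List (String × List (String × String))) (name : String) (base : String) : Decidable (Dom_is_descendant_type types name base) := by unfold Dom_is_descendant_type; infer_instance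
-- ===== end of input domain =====

-- ===== PORT A =====
-- B replaces A's exhaustive recursive path enumeration by an iterative ancestor-set
-- closure (grow the set of names reachable from `name` until it stops changing).
-- A-side: A's unbounded recursion, with a fuel guard of types.length + 2 — under
-- Pre_ (no cycle reachable from `name` avoiding `base`) every recursion chain of the
-- Python passes through distinct keys of `types` plus at most one terminal name, so
-- this fuel is never exhausted.
def isDescA (types : List (String × List (String × String))) (fuel : Nat) (name base : String) : Bool :=
  match fuel with
  | 0 => false
  | f + 1 =>
    if name = base then true
    else
      match (PySem.Dict.mk types).get? name with
      | none => false
      | some t =>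
        match (PySem.Dict.mk t).get? "parent" with
        | none => false
        | some p =>
          if p = "" then false
          else (((PySem.Str.split? p ",").getD []).map (fun q => isDescA types f q base)).any id

def is_descendant_type (types : List (String × List (String × String))) (name : String) (base : String) : Bool :=
  isDescA types (types.length + 2) name base

-- ===== PORT B =====
-- Source B's _parents_of
def parentsOfB (types : List (String × List (String × String))) (n : String) : List String :=
  match (PySem.Dict.mk types).get? n with
  | none => []
  | some t =>
    match (PySem.Dict.mk t).get? "parent" with
    | none => []
    | some p => if p = "" then [] else (PySem.Str.split? p ",").getD []

-- one round of Source B's inner loop: for n in list(reach): reach.update(_parents_of(types, n))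
def stepB (types : List (String × List (String × String))) (s : PySem.Set String) : PySem.Set String :=
  s.foldl (fun acc n => PySem.Set.update acc (parentsOfB types n)) s

-- Source B's outer loop: at most types.length + 1 rounds, breaking once the set stops growing
def loopB (types : List (String × List (String × String))) : Nat → PySem.Set String → PySem.Set String
  | 0, s => s
  | k + 1, s =>
    let s' := stepB types s
    if PySem.Set.len s' = PySem.Set.len s then s' else loopB types k s'

def is_descendant_type_alt (types : List (String × List (String × String))) (name : String) (base : String) : Bool :=
  PySem.Set.contains (loopB types (types.length + 1) (PySem.Set.ofList [name])) base

-- ===== PRECONDITION & SPEC =====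
-- Pre_-side copies of the parent lookup and closure (Pre_ may not mention the ports).
-- Edges of the graph A's recursion walks: `base` is never expanded (A returns there).
def pvParentsAvoid (types : List (String × List (String × String))) (base n : String) : List String :=
  if n = base then []
  else
    match (PySem.Dict.mk types).get? n with
    | none => []
    | some t =>
      match (PySem.Dict.mk t).get? "parent" with
      | none => []
      | some p => if p = "" then [] else (PySem.Str.split? p ",").getD []

def pvStepAvoid (types : List (String × List (String × String))) (base : String) (s : PySem.Set String) : PySem.Set String :=
  s.foldl (fun acc m => PySem.Set.update acc (pvParentsAvoid types base m)) s

-- names A's recursion can visit from `name` (paths not passing through `base`)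
def pvReach (types : List (String × List (String × String))) (name base : String) : PySem.Set String :=
  (List.range (types.length + 1)).foldl (fun s _ => pvStepAvoid types base s) (PySem.Set.ofList [name])

-- strict ancestors of x along the same edges
def pvAncAvoid (types : List (String × List (String × String))) (base x : String) : PySem.Set String :=
  (List.range types.length).foldl (fun s _ => pvStepAvoid types base s) (PySem.Set.ofList (pvParentsAvoid types base x))

-- Pre_ excludes exactly the inputs on which Python A raises: those whose parent graph has
-- a directed cycle reachable from `name` along edges that do not pass through `base` —
-- there A's recursion never terminates (RecursionError). On every other input A returns.
def Pre_is_descendant_type (types : List (String × List (String × String))) (name : String) (base : String) : Prop :=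
  ∀ x ∈ pvReach types name base, x ∉ pvAncAvoid types base x
instance (types : List (String × List (String × String))) (name : String) (base : String) : Decidable (Pre_is_descendant_type types name base) := by unfold Pre_is_descendant_type; infer_instance

def pvWitness_is_descendant_type : (List (String × List (String × String))) × String × String :=
  ([("B", [("parent", "A")]), ("C", [("parent", "A,B")])], "C", "A")

def Spec_is_descendant_type (types : List (String × List (String × String))) (name : String) (base : String) (out : Bool) : Prop := out = is_descendant_type_alt types name base
instance (types : List (String × List (String × String))) (name : String) (base : String) (out : Bool) : Decidable (Spec_is_descendant_type types name base out) := by unfold Spec_is_descendant_type; infer_instance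

-- ===== CLAIM (what is proved, stated in full; the proofs are below) =====
def Claim_equal_is_descendant_type : Prop := ∀ (types : List (String × List (String × String))) (name : String) (base : String), Dom_is_descendant_type types name base → Pre_is_descendant_type types name base → Spec_is_descendant_type types name base (is_descendant_type types name base)

-- ===== LEMMAS AND PROOFS =====

-- `E types m u v`: there is a parent-chain of exactly m edges from u to v
def E (types : List (String × List (String × String))) : Nat → String → String → Prop
  | 0, u, v => u = v
  | m + 1, u, v => ∃ q ∈ parentsOfB types u, E types m q v

-- one unfolding of A's recursion, phrased through B's parent lookup (the two
-- lookups perform the same case analysis)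
theorem isDescA_succ (types : List (String × List (String × String))) (f : Nat) (n base : String) :
    isDescA types (f + 1) n base = true ↔
      n = base ∨ ∃ q ∈ parentsOfB types n, isDescA types f q base = true := by
  by_cases hb : n = base
  · simp [isDescA, hb]
  · cases h1 : (PySem.Dict.mk types).get? n with
    | none => simp [isDescA, parentsOfB, hb, h1]
    | some t =>
      cases h2 : (PySem.Dict.mk t).get? "parent" with
      | none => simp [isDescA, parentsOfB, hb, h1, h2]
      | some p =>
        by_cases hp : p = ""
        · simp [isDescA, parentsOfB, hb, h1, h2, hp]
        · simp [isDescA, parentsOfB, hb, h1, h2, hp, List.any_map, List.any_eq_true]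

theorem isDescA_iff (types : List (String × List (String × String))) (base : String) :
    ∀ (f : Nat) (n : String), isDescA types (f + 1) n base = true ↔ ∃ m ≤ f, E types m n base := by
  intro f
  induction f with
  | zero =>
    intro n
    rw [isDescA_succ]
    constructor
    · rintro (h | ⟨q, _, h⟩)
      · exact ⟨0, Nat.le_refl 0, h⟩
      · exact absurd h (by simp [isDescA])
    · rintro ⟨m, hm, hE⟩
      interval_cases m
      exact Or.inl hE
  | succ f ih =>
    intro n
    rw [isDescA_succ]
    constructor
    · rintro (h | ⟨q, hq, h⟩)
      · exact ⟨0, Nat.zero_le _, h⟩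
      · obtain ⟨m, hm, hE⟩ := (ih q).mp h
        exact ⟨m + 1, by omega, ⟨q, hq, hE⟩⟩
    · rintro ⟨m, hm, hE⟩
      cases m with
      | zero => exact Or.inl hE
      | succ m =>
        obtain ⟨q, hq, hE'⟩ := hE
        exact Or.inr ⟨q, hq, (ih q).mpr ⟨m, by omega, hE'⟩⟩

theorem mem_foldl_update (types : List (String × List (String × String))) :
    ∀ (l : List String) (acc : PySem.Set String) (x : String),
      x ∈ l.foldl (fun a n => PySem.Set.update a (parentsOfB types n)) acc ↔
        x ∈ acc ∨ ∃ n ∈ l, x ∈ parentsOfB types n := by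
  intro l
  induction l with
  | nil => simp
  | cons h t ih =>
    intro acc x
    rw [List.foldl_cons, ih, PySem.Set.mem_update]
    constructor
    · rintro ((ha | hh) | ⟨n, hn, hp⟩)
      · exact Or.inl ha
      · exact Or.inr ⟨h, List.mem_cons_self, hh⟩
      · exact Or.inr ⟨n, List.mem_cons_of_mem _ hn, hp⟩
    · rintro (ha | ⟨n, hn, hp⟩)
      · exact Or.inl (Or.inl ha)
      · rcases List.mem_cons.mp hn with rfl | hn
        · exact Or.inl (Or.inr hp)
        · exact Or.inr ⟨n, hn, hp⟩

theorem mem_stepB (types : List (String × List (String × String))) (s : PySem.Set String) (x : String) :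
    x ∈ stepB types s ↔ x ∈ s ∨ ∃ n ∈ s, x ∈ parentsOfB types n :=
  mem_foldl_update types s s x

-- appending one edge at the end of an exact-length chain
theorem E_snoc_iff (types : List (String × List (String × String))) :
    ∀ (m : Nat) (u x : String),
      E types (m + 1) u x ↔ ∃ v, E types m u v ∧ x ∈ parentsOfB types v := by
  intro m
  induction m with
  | zero =>
    intro u x
    constructor
    · rintro ⟨q, hq, rfl⟩; exact ⟨u, rfl, hq⟩
    · rintro ⟨v, rfl, hx⟩; exact ⟨x, hx, rfl⟩
  | succ m ih =>
    intro u x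
    constructor
    · rintro ⟨q, hq, hE⟩
      obtain ⟨v, hEv, hx⟩ := (ih q x).mp hE
      exact ⟨v, ⟨q, hq, hEv⟩, hx⟩
    · rintro ⟨v, ⟨q, hq, hEv⟩, hx⟩
      exact ⟨q, hq, (ih q x).mpr ⟨v, hEv, hx⟩⟩

theorem mem_iterate_iff (types : List (String × List (String × String))) (name : String) :
    ∀ (k : Nat) (x : String),
      x ∈ (stepB types)^[k] (PySem.Set.ofList [name]) ↔ ∃ m ≤ k, E types m name x := by
  intro k
  induction k with
  | zero =>
    intro x
    simp only [Function.iterate_zero, id_eq, PySem.Set.mem_ofList, List.mem_singleton]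
    constructor
    · rintro rfl; exact ⟨0, Nat.le_refl 0, rfl⟩
    · rintro ⟨m, hm, hE⟩
      interval_cases m
      exact hE.symm
  | succ k ih =>
    intro x
    rw [Function.iterate_succ_apply', mem_stepB]
    constructor
    · rintro (h | ⟨n, hn, hp⟩)
      · obtain ⟨m, hm, hE⟩ := (ih x).mp h
        exact ⟨m, by omega, hE⟩
      · obtain ⟨m, hm, hE⟩ := (ih n).mp hn
        exact ⟨m + 1, by omega, (E_snoc_iff types m name x).mpr ⟨n, hE, hp⟩⟩
    · rintro ⟨m, hm, hE⟩
      by_cases hmk : m ≤ k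
      · exact Or.inl ((ih x).mpr ⟨m, hmk, hE⟩)
      · have hmeq : m = k + 1 := by omega
        subst hmeq
        obtain ⟨v, hEv, hx⟩ := (E_snoc_iff types k name x).mp hE
        exact Or.inr ⟨v, (ih v).mpr ⟨k, Nat.le_refl k, hEv⟩, hx⟩

-- Set.add appends at most one element, so every update/stepB extends its argument
theorem add_append (s : PySem.Set String) (x : String) : ∃ t, PySem.Set.add s x = s ++ t := by
  unfold PySem.Set.add
  split
  · exact ⟨[], by simp⟩
  · exact ⟨[x], rfl⟩

theorem update_append (s : PySem.Set String) (xs : List String) :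
    ∃ t, PySem.Set.update s xs = s ++ t := by
  induction xs generalizing s with
  | nil => exact ⟨[], by simp [PySem.Set.update]⟩
  | cons x xs ih =>
    obtain ⟨t1, h1⟩ := add_append s x
    obtain ⟨t2, h2⟩ := ih (PySem.Set.add s x)
    exact ⟨t1 ++ t2, by simp [PySem.Set.update] at h2 ⊢; rw [h2, h1, List.append_assoc]⟩

theorem foldl_update_append (types : List (String × List (String × String))) :
    ∀ (l : List String) (acc : PySem.Set String),
      ∃ t, l.foldl (fun a n => PySem.Set.update a (parentsOfB types n)) acc = acc ++ t := by
  intro l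
  induction l with
  | nil => exact fun acc => ⟨[], by simp⟩
  | cons h l ih =>
    intro acc
    obtain ⟨t1, h1⟩ := update_append acc (parentsOfB types h)
    obtain ⟨t2, h2⟩ := ih (PySem.Set.update acc (parentsOfB types h))
    exact ⟨t1 ++ t2, by rw [List.foldl_cons, h2, h1, List.append_assoc]⟩

theorem stepB_append (types : List (String × List (String × String))) (s : PySem.Set String) :
    ∃ t, stepB types s = s ++ t :=
  foldl_update_append types s s

-- the break test: equal sizes mean the round added nothing
theorem stepB_eq_of_len_eq (types : List (String × List (String × String))) (s : PySem.Set String)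
    (h : PySem.Set.len (stepB types s) = PySem.Set.len s) : stepB types s = s := by
  obtain ⟨t, ht⟩ := stepB_append types s
  rw [ht]
  unfold PySem.Set.len at h
  rw [ht] at h
  simp at h
  simp [h]

theorem iterate_fixed (types : List (String × List (String × String))) (s : PySem.Set String)
    (h : stepB types s = s) : ∀ k, (stepB types)^[k] s = s := by
  intro k
  induction k with
  | zero => rfl
  | succ k ih => rw [Function.iterate_succ_apply, h, ih]

-- the loop with its break computes the full k-fold iterate
theorem loopB_eq_iterate (types : List (String × List (String × String))) :
    ∀ (k : Nat) (s : PySem.Set String), loopB types k s = (stepB types)^[k] s := by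
  intro k
  induction k with
  | zero => intro s; rfl
  | succ k ih =>
    intro s
    rw [loopB]
    by_cases h : PySem.Set.len (stepB types s) = PySem.Set.len s
    · have hfix := stepB_eq_of_len_eq types s h
      simp only [h, if_pos]
      rw [Function.iterate_succ_apply, hfix, iterate_fixed types s hfix]
    · simp only [h, ite_false]
      rw [ih, Function.iterate_succ_apply]

-- ===== VERDICT (by name: the statement is the Claim_ definition above) =====
theorem is_descendant_type_spec : Claim_equal_is_descendant_type := by
  intro types name base _dom _pre
  unfold Spec_is_descendant_type is_descendant_type is_descendant_type_alt
  rw [Bool.eq_iff_iff, PySem.Set.contains_iff, loopB_eq_iterate, mem_iterate_iff,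
    show types.length + 2 = (types.length + 1) + 1 from rfl, isDescA_iff]
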